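-- pv_equiv track=rewrite | github.com/hauskens/YappR | app/search.py | search_words_present_in_sentence_strict
-- ===== SOURCE A (Python) =====
-- def search_words_present_in_sentence_strict(
--     sentence: list[str], search_words: list[str]
-- ) -> bool:
--     """looks for consecutive words"""
--     if not search_words:
--         return False
--
--     sentence_len = len(sentence)
--     search_len = len(search_words)
--
--     if search_len > sentence_len:
--         return False
--
--     # Use sliding window to check for consecutive matches
--     for i in range(sentence_len - search_len + 1):
--         if sentence[i:i + search_len] == search_words:
--             return True
--     return False
-- ===== SOURCE B (Python) =====
-- def search_words_present_in_sentence_strict(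
--     sentence: list[str], search_words: list[str]
-- ) -> bool:
--     """looks for consecutive words"""
--     if not search_words:
--         return False
--     rest = sentence
--     while len(rest) >= len(search_words):
--         if all(w == r for w, r in zip(search_words, rest)):
--             return True
--         rest = rest[1:]
--     return False
-- ===== Notes on version B (the rewrite author's own statement) =====
-- stated objective: alternative
-- what changed: Replaced the index loop that materialises and compares a fresh slice list per window with a suffix scan using an early-exit word-by-word prefix check (no slice allocation, mismatch stops immediately).
import Mathlib
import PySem

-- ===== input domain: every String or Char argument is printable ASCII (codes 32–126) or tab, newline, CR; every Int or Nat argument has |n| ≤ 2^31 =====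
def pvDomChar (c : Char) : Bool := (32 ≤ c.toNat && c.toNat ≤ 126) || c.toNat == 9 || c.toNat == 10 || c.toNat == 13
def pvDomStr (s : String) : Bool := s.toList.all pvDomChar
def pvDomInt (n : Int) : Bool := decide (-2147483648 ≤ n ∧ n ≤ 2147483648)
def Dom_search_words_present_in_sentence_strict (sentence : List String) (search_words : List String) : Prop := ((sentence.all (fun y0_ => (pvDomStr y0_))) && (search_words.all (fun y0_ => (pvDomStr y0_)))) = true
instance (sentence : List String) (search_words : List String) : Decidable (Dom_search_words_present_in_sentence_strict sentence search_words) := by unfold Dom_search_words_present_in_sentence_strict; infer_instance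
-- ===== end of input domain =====

-- B replaces A's index loop with per-window slice-and-compare lists by a shrinking suffix
-- scan with an early-exit zip compare (objective: alternative; same asymptotic cost).


-- ===== PORT A =====
def search_words_present_in_sentence_strict (sentence : List String) (search_words : List String) : Bool :=
  if search_words.isEmpty then false
  else
    let sentence_len : Int := sentence.length
    let search_len : Int := search_words.length
    if search_len > sentence_len then false
    else
      -- 'for i in range(…): if …: return True' / 'return False' = any over the range
      (PySem.List.pyRange 0 (sentence_len - search_len + 1) 1).any
        (fun i => PySem.List.slice sentence (some i) (some (i + search_len)) == search_words)

-- ===== PORT B =====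
-- all(w == r for w, r in zip(search_words, rest))
def pvAltZipEq (words rest : List String) : Bool :=
  (List.zip words rest).all (fun p => p.1 == p.2)

-- 'while len(rest) >= len(search_words): …; rest = rest[1:]'
def pvAltScan (w : List String) (rest : List String) : Bool :=
  if w.length ≤ rest.length then
    if pvAltZipEq w rest then true
    else
      match rest with
      | [] => false          -- unreachable: w.length ≤ 0 forces w = [] and the zip compare succeeded
      | _ :: t => pvAltScan w t
  else false

def search_words_present_in_sentence_strict_alt (sentence : List String) (search_words : List String) : Bool :=
  if search_words.isEmpty then false
  else pvAltScan search_words sentence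

-- ===== PRECONDITION & SPEC =====
def Spec_search_words_present_in_sentence_strict (sentence : List String) (search_words : List String) (out : Bool) : Prop := out = search_words_present_in_sentence_strict_alt sentence search_words
instance (sentence : List String) (search_words : List String) (out : Bool) : Decidable (Spec_search_words_present_in_sentence_strict sentence search_words out) := by unfold Spec_search_words_present_in_sentence_strict; infer_instance

-- ===== CLAIM (what is proved, stated in full; the proofs are below) =====
def Claim_equal_search_words_present_in_sentence_strict : Prop := ∀ (sentence : List String) (search_words : List String), Dom_search_words_present_in_sentence_strict sentence search_words → Spec_search_words_present_in_sentence_strict sentence search_words (search_words_present_in_sentence_strict sentence search_words)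

-- ===== LEMMAS AND PROOFS =====

theorem pvAltZipEq_eq_isPrefixOf (w rest : List String) (h : w.length ≤ rest.length) :
    pvAltZipEq w rest = w.isPrefixOf rest := by
  induction w generalizing rest with
  | nil => simp [pvAltZipEq, List.isPrefixOf]
  | cons a w ih =>
    cases rest with
    | nil => simp at h
    | cons b t =>
      simp only [pvAltZipEq, List.zip_cons_cons, List.all_cons, List.isPrefixOf]
      rw [← ih t (by simpa using h)]
      rfl

theorem pvAltScan_iff (w : List String) (hw : w ≠ []) (rest : List String) :
    pvAltScan w rest = true ↔ w <:+: rest := by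
  induction rest with
  | nil =>
    rw [pvAltScan]
    simp [List.infix_nil, hw]
  | cons b t ih =>
    rw [pvAltScan]
    by_cases hlen : w.length ≤ (b :: t).length
    · rw [if_pos hlen, pvAltZipEq_eq_isPrefixOf w _ hlen]
      rw [List.infix_cons_iff]
      by_cases hp : w.isPrefixOf (b :: t)
      · simp [hp, List.isPrefixOf_iff_prefix.mp hp]
      · have hp' : ¬ w <+: (b :: t) := fun h => hp (List.isPrefixOf_iff_prefix.mpr h)
        simp [hp, hp', ih]
    · rw [if_neg hlen]
      constructor
      · intro h; exact absurd h (by simp)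
      · intro h; exact absurd h.length_le (by simpa using hlen)

theorem pvA_iff (s w : List String) (hw : w ≠ []) :
    search_words_present_in_sentence_strict s w = true ↔ w <:+: s := by
  unfold search_words_present_in_sentence_strict
  rw [if_neg (by simpa using hw)]
  by_cases hlen : w.length ≤ s.length
  · rw [if_neg (by omega)]
    have hcast : (s.length : Int) - (w.length : Int) + 1 = ((s.length - w.length + 1 : Nat) : Int) := by
      push_cast [Nat.cast_sub hlen]; ring
    rw [hcast, PySem.List.pyRange_one, Int.sub_zero, Int.toNat_natCast]
    constructor
    · intro h
      rcases List.any_eq_true.mp ((List.any_map).symm ▸ h) with ⟨k, hk, hkeq⟩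
      simp only [Function.comp, zero_add] at hkeq
      rw [show ((k : Int) + (w.length : Int)) = ((k : Int) + ((w.length : Nat) : Int)) from rfl,
        PySem.List.slice_natCast_add] at hkeq
      have heq : (s.drop k).take w.length = w := by simpa using hkeq
      have h1 : (s.drop k).take w.length <+: s.drop k := List.take_prefix _ _
      have h2 : s.drop k <:+ s := List.drop_suffix _ _
      exact heq ▸ List.infix_iff_prefix_suffix.mpr ⟨_, h1, h2⟩
    · intro h
      rcases h with ⟨u, v, huv⟩
      rw [List.any_map]
      refine List.any_eq_true.mpr ⟨u.length, List.mem_range.mpr ?_, ?_⟩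
      · have : s.length = u.length + w.length + v.length := by
          rw [← huv]; simp; omega
        omega
      · simp only [Function.comp, zero_add]
        rw [show ((u.length : Int) + (w.length : Int)) = ((u.length : Nat) : Int) + ((w.length : Nat) : Int) from rfl,
          PySem.List.slice_natCast_add, ← huv]
        rw [List.append_assoc, List.drop_left, List.take_left]
        simp
  · rw [if_pos (by omega)]
    constructor
    · intro h; exact absurd h (by simp)
    · intro h; exact absurd h.length_le (by omega)

-- ===== VERDICT (by name: the statement is the Claim_ definition above) =====
theorem search_words_present_in_sentence_strict_spec : Claim_equal_search_words_present_in_sentence_strict := by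
  intro s w _
  unfold Spec_search_words_present_in_sentence_strict
  by_cases hw : w = []
  · subst hw
    simp [search_words_present_in_sentence_strict, search_words_present_in_sentence_strict_alt]
  · have hiff := (pvA_iff s w hw).trans (pvAltScan_iff w hw s).symm
    have halt : search_words_present_in_sentence_strict_alt s w = pvAltScan w s := by
      unfold search_words_present_in_sentence_strict_alt
      rw [if_neg (by simpa using hw)]
    rw [halt]
    cases h : search_words_present_in_sentence_strict s w with
    | true => exact (hiff.mp h).symm
    | false =>
      cases h2 : pvAltScan w s with
      | true => exact absurd (hiff.mpr h2) (by simp [h])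
      | false => rfl
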